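-- pv_equiv track=rewrite | github.com/feliciatrinh/coding-challenges-and-review | arrays/cut_bamboo.py | cut_bamboo
-- ===== SOURCE A (Python) =====
-- def cut_bamboo(lengths):
-- 	pieces = [] # number of pieces at the start of each turn
-- 	numPieces = len(lengths)
-- 	while numPieces > 0:
-- 		piecesRemoved = 0
-- 		minLength = min(lengths)
-- 		pieces.append(len(lengths))
-- 		for i in range(len(lengths)):
-- 			if lengths[i] == minLength:
-- 				numPieces -= 1
-- 				piecesRemoved += 1
-- 			lengths[i] -= minLength
-- 		for j in range(piecesRemoved):
-- 			lengths.remove(0)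
-- 	return pieces
-- ===== SOURCE B (Python) =====
-- def cut_bamboo(lengths):
--     # note: unlike the original, this does not mutate `lengths`
--     n = len(lengths)
--     s = sorted(lengths)
--     return [n - i for i in range(n) if i == 0 or s[i] != s[i - 1]]
-- ===== Notes on version B (the rewrite author's own statement) =====
-- stated objective: faster
-- what changed: B replaces A's O(n^2) destructive simulation (repeatedly take min, subtract it from every element, remove the zeros) by a single sort: each distinct length, in ascending order, contributes n minus its first index in the sorted list; A mutates its argument in place while B leaves it untouched (return values agree everywhere).
import Mathlib
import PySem

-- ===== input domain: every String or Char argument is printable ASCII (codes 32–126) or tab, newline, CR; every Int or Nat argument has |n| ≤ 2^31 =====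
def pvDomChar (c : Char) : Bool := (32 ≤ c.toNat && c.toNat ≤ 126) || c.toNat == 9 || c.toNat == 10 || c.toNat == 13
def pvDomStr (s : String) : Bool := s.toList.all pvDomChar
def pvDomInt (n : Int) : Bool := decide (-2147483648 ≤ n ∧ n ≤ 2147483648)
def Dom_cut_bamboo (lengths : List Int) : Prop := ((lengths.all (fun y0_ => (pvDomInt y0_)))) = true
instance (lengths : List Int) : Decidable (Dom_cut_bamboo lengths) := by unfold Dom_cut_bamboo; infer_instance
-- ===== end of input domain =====

-- B replaces A's destructive cut-simulation (repeated min / subtract / remove, O(n^2))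
-- by one sort: each distinct length, ascending, contributes n minus its first sorted index.
-- A mutates its argument `lengths` in place (it ends up empty); B does not — the claim
-- proved here is about the RETURN value only.


-- ===== PORT A =====
-- `for j in range(piecesRemoved): lengths.remove(0)` — remove? none = Python's ValueError, unreachable here
def cut_bamboo_removals (pr : Int) (ls : List Int) : List Int :=
  (PySem.List.pyRange 0 pr 1).foldl (fun acc _ => (PySem.List.remove? acc 0).getD acc) ls

-- the `while numPieces > 0` loop; fuel = initial len(lengths) bounds the number of rounds
def cut_bamboo_loop : Nat → List Int → List Int → Int → List Int
  | 0, _, pieces, _ => pieces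
  | fuel+1, ls, pieces, numPieces =>
    if numPieces > 0 then
      match PySem.List.min? ls (fun x => x) with
      | none => pieces   -- Python: min([]) raises; unreachable since numPieces = len(ls)
      | some m =>
        let pieces' := pieces ++ [(ls.length : Int)]
        let st := (PySem.List.pyRange 0 (ls.length : Int) 1).foldl
          (fun (st : List Int × Int × Int) i =>
            let v := PySem.List.pyGetD st.1 i 0
            (st.1.set i.toNat (v - m),
             (if v = m then st.2.1 - 1 else st.2.1),
             (if v = m then st.2.2 + 1 else st.2.2))) (ls, numPieces, 0)
        cut_bamboo_loop fuel (cut_bamboo_removals st.2.2 st.1) pieces' st.2.1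
    else pieces

def cut_bamboo (lengths : List Int) : List Int :=
  cut_bamboo_loop lengths.length lengths [] (lengths.length : Int)

-- ===== PORT B =====
-- Source B: n = len(lengths); s = sorted(lengths); [n - i for i in range(n) if i == 0 or s[i] != s[i-1]]
def cut_bamboo_alt (lengths : List Int) : List Int :=
  let n : Int := (lengths.length : Int)
  let s := PySem.List.sorted lengths (fun x => x)
  (PySem.List.pyRange 0 n 1).foldl
    (fun acc i =>
      if i == 0 || PySem.List.pyGetD s i 0 != PySem.List.pyGetD s (i-1) 0
      then acc ++ [n - i] else acc) []

-- ===== PRECONDITION & SPEC =====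
def Spec_cut_bamboo (lengths : List Int) (out : List Int) : Prop := out = cut_bamboo_alt lengths
instance (lengths : List Int) (out : List Int) : Decidable (Spec_cut_bamboo lengths out) := by unfold Spec_cut_bamboo; infer_instance

-- ===== CLAIM (what is proved, stated in full; the proofs are below) =====
def Claim_equal_cut_bamboo : Prop := ∀ (lengths : List Int), Dom_cut_bamboo lengths → Spec_cut_bamboo lengths (cut_bamboo lengths)

-- ===== LEMMAS AND PROOFS =====

lemma filter_erase_ne (l : List Int) (a : Int) :
    (l.erase a).filter (fun x => x != a) = l.filter (fun x => x != a) := by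
  induction l with
  | nil => rfl
  | cons x t ih =>
    by_cases hx : x = a
    · subst hx; simp [List.erase_cons_head]
    · rw [List.erase_cons_tail (by simp [hx])]
      simp [hx, ih]

lemma foldl_const {α β : Type} (g : α → α) (r : List β) (a : α) :
    r.foldl (fun x _ => g x) a = g^[r.length] a := by
  induction r generalizing a with
  | nil => rfl
  | cons x t ih => simp [List.foldl_cons, ih, Function.iterate_succ_apply]

lemma iterate_remove (c : Nat) : ∀ (l : List Int), l.count 0 = c →
    (fun acc => (PySem.List.remove? acc 0).getD acc)^[c] l = l.filter (fun x => x != 0) := by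
  induction c with
  | zero =>
    intro l hl
    have h0 : (0:Int) ∉ l := by simpa using (List.count_eq_zero.mp hl)
    symm
    rw [Function.iterate_zero, id_eq, List.filter_eq_self]
    intro x hx
    simp only [bne_iff_ne, ne_eq]
    rintro rfl; exact h0 hx
  | succ c ih =>
    intro l hl
    have h0 : (0:Int) ∈ l := by
      rw [← List.count_pos_iff]; omega
    rw [Function.iterate_succ_apply]
    have hrem := PySem.List.remove?_eq_some_erase l 0 h0
    simp only [hrem, Option.getD_some]
    rw [ih (l.erase 0) (by rw [List.count_erase_self]; omega)]
    exact filter_erase_ne l 0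

lemma removals_spec (c : Nat) (l : List Int) (h : l.count 0 = c) :
    cut_bamboo_removals (c : Int) l = l.filter (fun x => x != 0) := by
  unfold cut_bamboo_removals
  rw [foldl_const (fun acc => (PySem.List.remove? acc 0).getD acc)]
  rw [PySem.List.length_pyRange_one]
  simp only [sub_zero, Int.toNat_natCast]
  exact iterate_remove c l h

lemma inner_spec (l0 : List Int) (m np0 : Int) : ∀ (k : Nat), k ≤ l0.length →
    ((PySem.List.pyRange 0 (k : Int) 1).foldl
      (fun (st : List Int × Int × Int) i =>
        let v := PySem.List.pyGetD st.1 i 0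
        (st.1.set i.toNat (v - m),
         (if v = m then st.2.1 - 1 else st.2.1),
         (if v = m then st.2.2 + 1 else st.2.2))) (l0, np0, 0))
    = ((l0.take k).map (fun x => x - m) ++ l0.drop k,
       np0 - ((l0.take k).countP (fun x => x == m) : Int),
       ((l0.take k).countP (fun x => x == m) : Int)) := by
  intro k
  induction k with
  | zero =>
    intro _
    rw [show ((0:Nat):Int) = 0 from rfl, PySem.List.pyRange_one_eq_nil le_rfl]
    simp
  | succ k ih =>
    intro hk
    have hk' : k < l0.length := by omega
    rw [show (((k+1:Nat)):Int) = (k:Int) + 1 by push_cast; ring]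
    rw [PySem.List.pyRange_one_succ_right (by positivity)]
    rw [List.foldl_append]
    rw [ih (by omega)]
    simp only [List.foldl_cons, List.foldl_nil]
    have hlenA : ((l0.take k).map (fun x => x - m)).length = k := by
      simp [Nat.min_eq_left (le_of_lt hk')]
    have hget : PySem.List.pyGetD ((l0.take k).map (fun x => x - m) ++ l0.drop k) ((k:Nat):Int) 0
        = l0[k] := by
      rw [PySem.List.pyGetD_natCast]
      rw [List.getD_eq_getElem _ _ (by simp; omega)]
      rw [List.getElem_append_right (by omega)]
      rw [List.getElem_drop]
      congr 1
      omega
    simp only [hget]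
    have hset : ((l0.take k).map (fun x => x - m) ++ l0.drop k).set ((k:Int)).toNat (l0[k] - m)
        = (l0.take (k+1)).map (fun x => x - m) ++ l0.drop (k+1) := by
      rw [Int.toNat_natCast, List.set_append, if_neg (by omega), hlenA, Nat.sub_self,
          List.drop_eq_getElem_cons hk', List.set_cons_zero, List.take_add_one, List.map_append]
      simp [List.getElem?_eq_getElem hk']
    have hcnt : ((l0.take (k+1)).countP (fun x => x == m))
        = (l0.take k).countP (fun x => x == m) + (if l0[k] = m then 1 else 0) := by
      rw [List.take_add_one, List.countP_append]
      by_cases h : l0[k] = m <;> simp [List.getElem?_eq_getElem hk', h]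
    simp only [Prod.mk.injEq]
    refine ⟨hset, ?_, ?_⟩
    · rw [hcnt]; split_ifs <;> push_cast <;> ring
    · rw [hcnt]; split_ifs <;> push_cast <;> ring

def pvStep (l : List Int) (m : Int) : List Int :=
  (l.filter (fun x => x != m)).map (fun x => x - m)

lemma pvStep_length_lt (l : List Int) (m : Int) (hm : PySem.List.min? l (fun x => x) = some m) :
    (pvStep l m).length < l.length := by
  have hmem := PySem.List.min?_mem hm
  unfold pvStep
  rw [List.length_map]
  have h1 : (l.filter (fun x => x != m)).length ≤ l.length := List.length_filter_le _ _
  rcases h1.lt_or_eq with h2 | h2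
  · exact h2
  · exfalso
    have := (List.length_filter_eq_length_iff).mp h2 m hmem
    simp at this

def pvRounds (l : List Int) : List Int :=
  match h : PySem.List.min? l (fun x => x) with
  | none => []
  | some m => (l.length : Int) :: pvRounds (pvStep l m)
termination_by l.length
decreasing_by exact pvStep_length_lt l m h

lemma pvRounds_nil : pvRounds [] = [] := by
  rw [pvRounds]
  rfl

lemma pvRounds_of_min (l : List Int) (m : Int) (hm : PySem.List.min? l (fun x => x) = some m) :
    pvRounds l = (l.length : Int) :: pvRounds (pvStep l m) := by
  rw [pvRounds]
  split
  · rename_i h; rw [hm] at h; cases h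
  · rename_i m' h; rw [hm] at h; cases h; rfl

lemma count_zero_map (l : List Int) (m : Int) :
    (l.map (fun x => x - m)).count 0 = l.countP (fun x => x == m) := by
  rw [List.count_eq_countP, List.countP_map]
  apply List.countP_congr
  intro x _
  constructor <;> (simp [Function.comp]; omega)

lemma filter_map_step (l : List Int) (m : Int) :
    (l.map (fun x => x - m)).filter (fun x => x != 0) = pvStep l m := by
  rw [List.filter_map]
  unfold pvStep
  congr 1
  apply List.filter_congr
  intro x _
  rw [Bool.eq_iff_iff]
  simp only [Function.comp, bne_iff_ne, ne_eq]
  omega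

lemma step_length (l : List Int) (m : Int) :
    ((pvStep l m).length : Int) = (l.length : Int) - (l.countP (fun x => x == m) : Int) := by
  unfold pvStep
  rw [List.length_map, ← List.countP_eq_length_filter]
  have := List.length_eq_countP_add_countP (p := fun x => x == m) (l := l)
  have h2 : l.countP (fun x => decide ¬(x == m) = true) = l.countP (fun x => x != m) := by
    apply List.countP_congr; intro x _; simp
  omega

lemma loop_spec : ∀ (fuel : Nat) (l pieces : List Int), l.length ≤ fuel →
    cut_bamboo_loop fuel l pieces (l.length : Int) = pieces ++ pvRounds l := by
  intro fuel
  induction fuel with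
  | zero =>
    intro l pieces h
    have : l = [] := List.eq_nil_of_length_eq_zero (by omega)
    subst this
    simp [cut_bamboo_loop, pvRounds_nil]
  | succ fuel ih =>
    intro l pieces h
    by_cases hl : l = []
    · subst hl
      simp [cut_bamboo_loop, pvRounds_nil]
    · have hlen : 0 < l.length := List.length_pos_iff.mpr hl
      obtain ⟨m, hm⟩ : ∃ m, PySem.List.min? l (fun x => x) = some m := by
        cases hmin : PySem.List.min? l (fun x => x) with
        | none => exact absurd ((PySem.List.min?_eq_none_iff l _).mp hmin) hl
        | some m => exact ⟨m, rfl⟩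
      rw [cut_bamboo_loop]
      rw [if_pos (by exact_mod_cast hlen)]
      rw [hm]
      simp only []
      rw [inner_spec l m (l.length : Int) l.length le_rfl]
      simp only [List.take_length, List.drop_length, List.append_nil]
      rw [removals_spec (l.countP (fun x => x == m)) (l.map (fun x => x - m)) (count_zero_map l m)]
      rw [filter_map_step]
      rw [show (l.length : Int) - (l.countP (fun x => x == m) : Int) = ((pvStep l m).length : Int) from (step_length l m).symm]
      rw [ih (pvStep l m) _ (by have := pvStep_length_lt l m hm; omega)]
      rw [pvRounds_of_min l m hm]
      simp

def pvBnds (s : List Int) : List Nat :=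
  (List.range s.length).filter (fun k => k == 0 || s.getD k 0 != s.getD (k-1) 0)

lemma alt_eq_bnds (l : List Int) :
    cut_bamboo_alt l
      = (pvBnds (PySem.List.sorted l (fun x => x))).map (fun (k : Nat) => (l.length : Int) - (k : Int)) := by
  unfold cut_bamboo_alt
  simp only []
  rw [PySem.List.foldl_append_if]
  rw [List.nil_append]
  rw [PySem.List.pyRange_one]
  simp only [sub_zero, Int.toNat_natCast]
  rw [List.filter_map, List.map_map]
  unfold pvBnds
  rw [PySem.List.length_sorted]
  rw [List.filter_congr (q := fun k => k == 0 || (PySem.List.sorted l (fun x => x)).getD k 0 != (PySem.List.sorted l (fun x => x)).getD (k-1) 0) ?_]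
  · apply List.map_congr_left
    intro k _
    simp [Function.comp]
  · intro k hk
    rw [List.mem_range, ← PySem.List.length_sorted l (fun x => x) false] at hk
    rcases Nat.eq_zero_or_pos k with h0 | h0
    · subst h0; rfl
    · simp only [Function.comp]
      have c1 : ((0:Int) + (k:Nat)) = ((k:Nat):Int) := by ring
      rw [c1]
      have c2 : ((k:Nat):Int) - 1 = (((k-1:Nat)):Int) := by push_cast [h0]; omega
      rw [c2, PySem.List.pyGetD_natCast, PySem.List.pyGetD_natCast]
      rw [Bool.eq_iff_iff]
      simp only [Bool.or_eq_true, beq_iff_eq]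
      constructor
      · rintro (h | h)
        · exfalso; revert h; simp; omega
        · right; exact h
      · rintro (h | h)
        · omega
        · right; exact h

lemma bnds_map (f : Int → Int) (hf : Function.Injective f) (t : List Int) :
    pvBnds (t.map f) = pvBnds t := by
  unfold pvBnds
  rw [List.length_map]
  apply List.filter_congr
  intro k hk
  rw [List.mem_range] at hk
  rcases Nat.eq_zero_or_pos k with h0 | h0
  · subst h0; rfl
  · have hk1 : k - 1 < t.length := by omega
    rw [List.getD_eq_getElem _ _ (by rw [List.length_map]; exact hk),
        List.getD_eq_getElem _ _ (by rw [List.length_map]; exact hk1),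
        List.getD_eq_getElem _ _ hk, List.getD_eq_getElem _ _ hk1,
        List.getElem_map, List.getElem_map]
    rw [Bool.eq_iff_iff]
    simp only [Bool.or_eq_true, bne_iff_ne, ne_eq, hf.eq_iff]

lemma bnds_rep (c : Nat) (hc : 0 < c) (m : Int) (t : List Int) (ht : ∀ x ∈ t, m < x) :
    pvBnds (List.replicate c m ++ t) = 0 :: (pvBnds t).map (fun k => k + c) := by
  unfold pvBnds
  rw [List.length_append, List.length_replicate, List.range_add, List.filter_append, List.filter_map]
  have hrep : ∀ j, j < c → (List.replicate c m ++ t).getD j 0 = m := by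
    intro j hj
    rw [List.getD_eq_getElem _ _ (by simp; omega), List.getElem_append_left (by simp [hj]),
        List.getElem_replicate]
  have hgt : ∀ j, j < t.length → (List.replicate c m ++ t).getD (c + j) 0 = t.getD j 0 := by
    intro j hj
    rw [List.getD_eq_getElem _ _ (by simp; omega), List.getElem_append_right (by simp), 
        List.getD_eq_getElem _ _ hj]
    congr 1
    simp
  have h1 : (List.range c).filter (fun k => k == 0 || (List.replicate c m ++ t).getD k 0 != (List.replicate c m ++ t).getD (k-1) 0) = [0] := by
    rw [List.filter_congr (q := fun k => k == 0) ?_]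
    · cases c with
      | zero => omega
      | succ c' =>
        rw [List.range_succ_eq_map, List.filter_cons_of_pos (by rfl)]
        rw [List.filter_map]
        rw [List.filter_congr (q := fun _ => false) (by intro a _; rfl)]
        simp
    · intro k hk
      rw [List.mem_range] at hk
      rcases Nat.eq_zero_or_pos k with h0 | h0
      · subst h0; rfl
      · rw [hrep k hk, hrep (k-1) (by omega)]
        simp
  have h2 : ((List.range t.length).filter (fun j => ((fun k => k == 0 || (List.replicate c m ++ t).getD k 0 != (List.replicate c m ++ t).getD (k-1) 0) ∘ (fun x => c + x)) j))
      = (List.range t.length).filter (fun k => k == 0 || t.getD k 0 != t.getD (k-1) 0) := by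
    apply List.filter_congr
    intro j hj
    rw [List.mem_range] at hj
    simp only [Function.comp]
    rcases Nat.eq_zero_or_pos j with h0 | h0
    · subst h0
      have hb : (c + 0 == 0) = false := by simp; omega
      rw [hgt 0 hj, hrep (c + 0 - 1) (by omega)]
      have h0t : m < t.getD 0 0 := by
        rw [List.getD_eq_getElem _ _ hj]
        exact ht _ (List.getElem_mem hj)
      rw [Bool.eq_iff_iff]
      simp only [hb, Bool.false_or, Bool.or_eq_true, bne_iff_ne, ne_eq, beq_iff_eq]
      constructor
      · intro _; trivial
      · intro _; omega
    · have e1 : c + j - 1 = c + (j - 1) := by omega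
      rw [hgt j hj, e1, hgt (j-1) (by omega)]
      rw [Bool.eq_iff_iff]
      simp only [Bool.or_eq_true, bne_iff_ne, ne_eq, beq_iff_eq]
      constructor
      · rintro (h | h)
        · omega
        · right; exact h
      · rintro (h | h)
        · omega
        · right; exact h
  rw [h1, h2]
  simp only [List.singleton_append]
  congr 1
  apply List.map_congr_left
  intro a _
  omega

lemma sorted_decomp (l : List Int) (m : Int) (hm : PySem.List.min? l (fun x => x) = some m) :
    PySem.List.sorted l (fun x => x)
      = List.replicate (l.countP (fun x => x == m)) m
        ++ PySem.List.sorted (l.filter (fun x => x != m)) (fun x => x) := by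
  apply PySem.List.sorted_id_eq_of_perm_of_pairwise
  · have e1 : List.replicate (l.countP (fun x => x == m)) m = l.filter (fun x => x == m) := by
      rw [← List.count_eq_countP, ← List.filter_beq]
    rw [e1]
    refine List.Perm.trans (List.Perm.append_left _ (PySem.List.sorted_perm _ _ _)) ?_
    have := List.filter_append_perm (fun x => x == m) l
    refine List.Perm.trans ?_ this
    apply List.Perm.append_left
    apply List.Perm.of_eq
    apply List.filter_congr
    intro x _
    rfl
  · rw [List.pairwise_append]
    refine ⟨?_, PySem.List.sorted_pairwise _ _, ?_⟩
    · rw [List.pairwise_replicate]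
      right; exact le_refl m
    · intro a ha b hb
      rw [List.eq_of_mem_replicate ha]
      have hb' : b ∈ l.filter (fun x => x != m) := (PySem.List.mem_sorted _ _ _ _).mp hb
      exact PySem.List.min?_isMin hm b (List.mem_of_mem_filter hb')

lemma sorted_step (l : List Int) (m : Int) :
    PySem.List.sorted (pvStep l m) (fun x => x)
      = (PySem.List.sorted (l.filter (fun x => x != m)) (fun x => x)).map (fun x => x - m) := by
  apply PySem.List.sorted_id_eq_of_perm_of_pairwise
  · exact List.Perm.map _ (PySem.List.sorted_perm _ _ _)
  · exact List.Pairwise.map _ (fun a b hab => by omega) (PySem.List.sorted_pairwise _ _)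

lemma rounds_eq_bnds : ∀ (n : Nat) (l : List Int), l.length ≤ n →
    pvRounds l = (pvBnds (PySem.List.sorted l (fun x => x))).map (fun (k : Nat) => (l.length : Int) - (k : Int)) := by
  intro n
  induction n with
  | zero =>
    intro l h
    have : l = [] := List.eq_nil_of_length_eq_zero (by omega)
    subst this
    rw [pvRounds_nil]; rfl
  | succ n ih =>
    intro l h
    cases hm : PySem.List.min? l (fun x => x) with
    | none =>
      have : l = [] := (PySem.List.min?_eq_none_iff l _).mp hm
      subst this
      rw [pvRounds_nil]; rfl
    | some m =>
      have hmem := PySem.List.min?_mem hm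
      set cnt := l.countP (fun x => x == m) with hcnt
      have hcpos : 0 < cnt := List.countP_pos_iff.mpr ⟨m, hmem, by simp⟩
      set T := PySem.List.sorted (l.filter (fun x => x != m)) (fun x => x) with hT
      have hTgt : ∀ x ∈ T, m < x := by
        intro x hx
        have hx' : x ∈ l.filter (fun x => x != m) := (PySem.List.mem_sorted _ _ _ _).mp hx
        have h1 := PySem.List.min?_isMin hm x (List.mem_of_mem_filter hx')
        have h2 : x ≠ m := by simpa using (List.of_mem_filter hx')
        omega
      have hstep := pvStep_length_lt l m hm
      rw [pvRounds_of_min l m hm]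
      rw [ih (pvStep l m) (by omega)]
      have hinj : Function.Injective (fun x : Int => x - m) := by
        intro a b hab; simp only at hab; omega
      rw [sorted_step, bnds_map (fun x => x - m) hinj]
      rw [sorted_decomp l m hm, bnds_rep cnt hcpos m T hTgt]
      rw [List.map_cons, List.map_map]
      have hlen : ((pvStep l m).length : Int) = (l.length : Int) - (cnt : Int) := step_length l m
      refine List.cons_eq_cons.mpr ⟨by push_cast; ring, ?_⟩
      apply List.map_congr_left
      intro a _
      simp only [Function.comp]
      rw [hlen]
      push_cast
      ring

lemma cut_bamboo_eq_rounds (l : List Int) : cut_bamboo l = pvRounds l := by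
  have := loop_spec l.length l [] le_rfl
  simpa [cut_bamboo] using this

lemma rounds_eq_alt (l : List Int) : pvRounds l = cut_bamboo_alt l := by
  rw [alt_eq_bnds, rounds_eq_bnds l.length l le_rfl]

-- ===== VERDICT (by name: the statement is the Claim_ definition above) =====
theorem cut_bamboo_spec : Claim_equal_cut_bamboo := by
  intro l _
  unfold Spec_cut_bamboo
  rw [cut_bamboo_eq_rounds, rounds_eq_alt]
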